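-- pv_equiv track=rewrite | github.com/jmrm2023/practicas_algoritmos_I | 08_practica_2_python.py | borrarPares_2
-- ===== SOURCE A (Python) =====
-- def borrarPares_2(s:list[int]) -> list[int]:
--     lista_final:list[int] = []
--     for i in range(len(s)):
--         if (i % 2 == 0):
--             lista_final.append(s[i])
--         else:
--             lista_final.append(0)
--     return lista_final
-- ===== SOURCE B (Python) =====
-- def borrarPares_2(s: list[int]) -> list[int]:
--     out = list(s)
--     out[1::2] = [0] * len(out[1::2])
--     return out
-- ===== Notes on version B (the rewrite author's own statement) =====
-- stated objective: idiomatic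
-- what changed: B copies the whole list once and then zeroes the odd positions with a single strided slice assignment, instead of an index loop with a per-element parity branch appending into a fresh list.
import Mathlib
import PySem

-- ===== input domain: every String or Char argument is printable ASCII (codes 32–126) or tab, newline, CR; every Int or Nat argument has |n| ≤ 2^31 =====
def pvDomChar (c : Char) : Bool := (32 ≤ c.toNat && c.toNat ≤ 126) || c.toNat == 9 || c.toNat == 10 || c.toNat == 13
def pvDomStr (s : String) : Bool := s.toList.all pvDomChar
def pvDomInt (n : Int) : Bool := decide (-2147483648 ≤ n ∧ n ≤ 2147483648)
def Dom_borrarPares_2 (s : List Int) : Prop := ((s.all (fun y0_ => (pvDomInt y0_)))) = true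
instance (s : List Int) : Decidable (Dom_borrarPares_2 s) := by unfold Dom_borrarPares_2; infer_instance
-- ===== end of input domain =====

-- B replaces A's index loop with its per-index parity branch by a one-shot copy plus a
-- strided slice assignment zeroing the odd positions (idiomatic; same O(n) cost; neither mutates the argument).

-- ===== PORT A =====
-- for i in range(len(s)): if i % 2 == 0: append(s[i]) else: append(0)
-- (the index i is always in range here, so pyGetD with default 0 is exact for s[i])
def borrarPares_2 (s : List Int) : List Int :=
  (PySem.List.pyRange 0 (s.length : Int) 1).foldl
    (fun acc i =>
      if i % 2 == 0 then acc ++ [PySem.List.pyGetD s i 0]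
      else acc ++ [0]) []

-- ===== PORT B =====
-- out[1::2] = [0] * len(out[1::2]) : the strided slice assignment is ported by hand,
-- exact for start 1 / step 2: keep every even position, write 0 at every odd one.
def pvZeroOdd : List Int → List Int
  | [] => []
  | [a] => [a]
  | a :: _ :: t => a :: 0 :: pvZeroOdd t

def borrarPares_2_alt (s : List Int) : List Int :=
  pvZeroOdd s

-- ===== PRECONDITION & SPEC =====
def Spec_borrarPares_2 (s : List Int) (out : List Int) : Prop := out = borrarPares_2_alt s
instance (s : List Int) (out : List Int) : Decidable (Spec_borrarPares_2 s out) := by unfold Spec_borrarPares_2; infer_instance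

-- ===== CLAIM (what is proved, stated in full; the proofs are below) =====
def Claim_equal_borrarPares_2 : Prop := ∀ (s : List Int), Dom_borrarPares_2 s → Spec_borrarPares_2 s (borrarPares_2 s)

-- ===== LEMMAS AND PROOFS =====

-- A's loop is a map over the index range
lemma borrarPares_2_eq_map (s : List Int) :
    borrarPares_2 s =
      (List.range s.length).map
        (fun (k : Nat) => if ((k : Int)) % 2 == 0 then s.getD k 0 else 0) := by
  unfold borrarPares_2
  have h : (fun (acc : List Int) (i : Int) =>
      if i % 2 == 0 then acc ++ [PySem.List.pyGetD s i 0] else acc ++ [0]) =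
      (fun acc i => acc ++ [if i % 2 == 0 then PySem.List.pyGetD s i 0 else 0]) := by
    funext acc i; split <;> rfl
  rw [h, PySem.List.foldl_append_singleton_eq_map, PySem.List.pyRange_one]
  simp [List.map_map, Function.comp_def]

lemma map_range_eq_pvZeroOdd (s : List Int) :
    (List.range s.length).map
      (fun (k : Nat) => if ((k : Int)) % 2 == 0 then s.getD k 0 else 0) = pvZeroOdd s := by
  induction s using pvZeroOdd.induct with
  | case1 => simp [pvZeroOdd]
  | case2 a => simp [pvZeroOdd]
  | case3 a b t ih =>
    show (List.range (t.length + 1 + 1)).map _ = _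
    rw [List.range_succ_eq_map, List.range_succ_eq_map]
    simp only [List.map_cons, List.map_map]
    have hfun : ((fun (k : Nat) => if ((k : Int)) % 2 == 0 then (a :: b :: t).getD k 0 else 0)
        ∘ Nat.succ ∘ Nat.succ) =
        (fun (k : Nat) => if ((k : Int)) % 2 == 0 then t.getD k 0 else 0) := by
      funext k
      have hdvd : (2 ∣ (k : Int) + 1 + 1) ↔ 2 ∣ (k : Int) := by omega
      simp [Function.comp, List.getD, hdvd]
    rw [hfun, ih]
    simp [pvZeroOdd, List.getD]

-- ===== VERDICT (by name: the statement is the Claim_ definition above) =====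
theorem borrarPares_2_spec : Claim_equal_borrarPares_2 := by
  intro s _
  unfold Spec_borrarPares_2 borrarPares_2_alt
  rw [borrarPares_2_eq_map, map_range_eq_pvZeroOdd]
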